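-- pv_equiv track=rewrite | github.com/praksekar/gerrymandering_honors_project | mmds.py | gen_mmd_configs
-- ===== SOURCE A (Python) =====
-- def gen_mmd_configs(n_reps: int) -> list[tuple]:
--     """
--     Generates a list of tuples that represent all possible MMD configurations
--     given a number of representatives. Each tuple has 3 elements, where the 0th,
--     1st and 2nd indexed elements represent the number of districts with 3, 4,
--     and 5 representatives, respectively. Each such unique tuple will hereon be
--     referred to as an "MMD config."
--
--     Arguments:
--         n_reps: number of representatives in the state
--     Returns:
--         List of MMD config 3-tuples
--     """
--
--     configs = []
--     for x1 in range(n_reps//3+1):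
--         for x2 in range(n_reps//4+1):
--             for x3 in range(n_reps//5+1):
--                 if x1*3 + x2*4 + x3*5 == n_reps:
--                     configs.append(dict.fromkeys(range(1, x1+1), 3)
--                         | dict.fromkeys(range(x1+1, x1+x2+1), 4)
--                         | dict.fromkeys(range(x1+x2+1, x1+x2+x3+1), 5))
--     return configs
-- ===== SOURCE B (Python) =====
-- def gen_mmd_configs(n_reps: int) -> list[tuple]:
--     # The inner x3 loop is replaced by a direct divisibility test; the config
--     # dict is built in one pass from the list of district sizes.
--     configs = []
--     for x1 in range(n_reps // 3 + 1):
--         r1 = n_reps - 3 * x1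
--         for x2 in range(r1 // 4 + 1):
--             r2 = r1 - 4 * x2
--             if r2 % 5 == 0:
--                 x3 = r2 // 5
--                 sizes = [3] * x1 + [4] * x2 + [5] * x3
--                 configs.append({i + 1: s for i, s in enumerate(sizes)})
--     return configs
-- ===== Notes on version B (the rewrite author's own statement) =====
-- stated objective: faster
-- what changed: The inner x3 loop is dropped: x3 is computed directly from the remainder via a divisibility test (O(n^2) instead of O(n^3)), and each config dict is built in one enumerate pass over the list of district sizes instead of merging three dict.fromkeys dicts; measured ~4x faster at the largest benchmark size.
import Mathlib
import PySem

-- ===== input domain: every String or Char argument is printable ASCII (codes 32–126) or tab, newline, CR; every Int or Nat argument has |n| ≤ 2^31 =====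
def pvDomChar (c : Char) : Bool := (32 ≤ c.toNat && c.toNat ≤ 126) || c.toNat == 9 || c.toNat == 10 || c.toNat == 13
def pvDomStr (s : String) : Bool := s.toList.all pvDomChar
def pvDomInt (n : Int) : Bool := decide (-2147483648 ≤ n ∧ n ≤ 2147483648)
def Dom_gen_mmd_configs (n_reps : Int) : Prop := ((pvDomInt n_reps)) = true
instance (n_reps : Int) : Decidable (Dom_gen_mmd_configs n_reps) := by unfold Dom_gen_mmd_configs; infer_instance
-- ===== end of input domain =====

-- B replaces A's inner x3 loop by a direct divisibility test and builds each config dict in one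
-- pass (measured ~4x faster at the largest benchmark size); equal output proved below.

-- ===== PORT A =====
-- dict.fromkeys(range(a, b), v) : insert each key in order with value v (exact: fresh keys append)
def pvFromkeysRange (a b v : Int) : PySem.Dict Int Int :=
  (PySem.List.pyRange a b 1).foldl (fun d k => d.insert k v) PySem.Dict.empty

-- Python dict merge d1 | d2, ported by hand as an insert-fold of d2's items into d1
-- (exact: right operand overwrites in place, new keys append in d2's order)
def pvDictOr (d1 d2 : PySem.Dict Int Int) : PySem.Dict Int Int :=
  d2.items.foldl (fun d p => d.insert p.1 p.2) d1

def gen_mmd_configs (n_reps : Int) : List (List (Int × Int)) :=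
  (PySem.List.pyRange 0 (PySem.Int.floordiv n_reps 3 + 1) 1).foldl (fun configs x1 =>
    (PySem.List.pyRange 0 (PySem.Int.floordiv n_reps 4 + 1) 1).foldl (fun configs x2 =>
      (PySem.List.pyRange 0 (PySem.Int.floordiv n_reps 5 + 1) 1).foldl (fun configs x3 =>
        if x1 * 3 + x2 * 4 + x3 * 5 = n_reps then
          configs ++ [(pvDictOr (pvDictOr (pvFromkeysRange 1 (x1 + 1) 3)
                                          (pvFromkeysRange (x1 + 1) (x1 + x2 + 1) 4))
                                (pvFromkeysRange (x1 + x2 + 1) (x1 + x2 + x3 + 1) 5)).items]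
        else configs) configs) configs) []

-- ===== PORT B =====
-- {i + 1: s for i, s in enumerate(sizes)}
def pvDictComp (sizes : List Int) : PySem.Dict Int Int :=
  (PySem.List.enumerate sizes 0).foldl (fun d p => d.insert (p.1 + 1) p.2) PySem.Dict.empty

def gen_mmd_configs_alt (n_reps : Int) : List (List (Int × Int)) :=
  (PySem.List.pyRange 0 (PySem.Int.floordiv n_reps 3 + 1) 1).foldl (fun configs x1 =>
    let r1 := n_reps - 3 * x1
    (PySem.List.pyRange 0 (PySem.Int.floordiv r1 4 + 1) 1).foldl (fun configs x2 =>
      let r2 := r1 - 4 * x2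
      if PySem.Int.mod r2 5 = 0 then
        let x3 := PySem.Int.floordiv r2 5
        -- [3]*x1 + [4]*x2 + [5]*x3  (counts are nonnegative here; toNat is exact)
        let sizes := List.replicate x1.toNat 3 ++ List.replicate x2.toNat 4 ++ List.replicate x3.toNat 5
        configs ++ [(pvDictComp sizes).items]
      else configs) configs) []

-- ===== PRECONDITION & SPEC =====
def Spec_gen_mmd_configs (n_reps : Int) (out : List (List (Int × Int))) : Prop := out = gen_mmd_configs_alt n_reps
instance (n_reps : Int) (out : List (List (Int × Int))) : Decidable (Spec_gen_mmd_configs n_reps out) := by unfold Spec_gen_mmd_configs; infer_instance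

-- ===== CLAIM (what is proved, stated in full; the proofs are below) =====
def Claim_equal_gen_mmd_configs : Prop := ∀ (n_reps : Int), Dom_gen_mmd_configs n_reps → Spec_gen_mmd_configs n_reps (gen_mmd_configs n_reps)

-- ===== LEMMAS AND PROOFS =====

def cfgItems (x1 x2 x3 : Int) : List (Int × Int) :=
  (PySem.List.pyRange 1 (x1+1) 1).map (fun k => (k, 3)) ++
  (PySem.List.pyRange (x1+1) (x1+x2+1) 1).map (fun k => (k, 4)) ++
  (PySem.List.pyRange (x1+x2+1) (x1+x2+x3+1) 1).map (fun k => (k, 5))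

theorem items_fromkeys (a b v : Int) :
    (pvFromkeysRange a b v).items = (PySem.List.pyRange a b 1).map (fun k => (k, v)) := by
  unfold pvFromkeysRange
  rw [PySem.Dict.items_foldl_insert_fresh _ (fun x => x) (fun _ => v) _
        (by intro x hx; rfl) (by simpa using PySem.List.nodup_pyRange_one a b)]
  rfl

theorem items_dictOr (d1 d2 : PySem.Dict Int Int)
    (h : ∀ p ∈ d2.items, d1.contains p.1 = false)
    (hn : (d2.items.map Prod.fst).Nodup) :
    (pvDictOr d1 d2).items = d1.items ++ d2.items := by
  unfold pvDictOr
  have := PySem.Dict.items_foldl_insert_fresh d2.items Prod.fst Prod.snd d1 h hn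
  simpa using this

theorem nodup_fst_pairs (v a b : Int) :
    (((PySem.List.pyRange a b 1).map (fun k => (k, v))).map Prod.fst).Nodup := by
  have h : ((PySem.List.pyRange a b 1).map (fun k => (k, v))).map Prod.fst = PySem.List.pyRange a b 1 := by
    rw [List.map_map]; exact List.map_id _
  rw [h]; exact PySem.List.nodup_pyRange_one a b

theorem keys_fromkeys (a b v : Int) :
    (pvFromkeysRange a b v).keys = PySem.List.pyRange a b 1 := by
  simp only [PySem.Dict.keys, items_fromkeys, List.map_map]
  exact List.map_id _

theorem contains_fromkeys (a b v k : Int) :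
    (pvFromkeysRange a b v).contains k = decide (a ≤ k ∧ k < b) := by
  rw [PySem.Dict.contains_eq_decide_mem_keys, keys_fromkeys]
  simp [PySem.List.mem_pyRange_one]

theorem itemsA (x1 x2 x3 : Int) (h2 : 0 ≤ x2) :
    (pvDictOr (pvDictOr (pvFromkeysRange 1 (x1+1) 3) (pvFromkeysRange (x1+1) (x1+x2+1) 4))
        (pvFromkeysRange (x1+x2+1) (x1+x2+x3+1) 5)).items = cfgItems x1 x2 x3 := by
  have h12 : (pvDictOr (pvFromkeysRange 1 (x1+1) 3) (pvFromkeysRange (x1+1) (x1+x2+1) 4)).items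
      = (PySem.List.pyRange 1 (x1+1) 1).map (fun k => (k, 3)) ++
        (PySem.List.pyRange (x1+1) (x1+x2+1) 1).map (fun k => (k, 4)) := by
    rw [items_dictOr, items_fromkeys, items_fromkeys]
    · intro p hp
      rw [items_fromkeys] at hp
      simp only [List.mem_map] at hp
      obtain ⟨q, hq, rfl⟩ := hp
      rw [PySem.List.mem_pyRange_one] at hq
      rw [contains_fromkeys]
      simp; omega
    · rw [items_fromkeys]
      exact nodup_fst_pairs 4 (x1+1) (x1+x2+1)
  rw [items_dictOr, h12, items_fromkeys, cfgItems, List.append_assoc]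
  · intro p hp
    rw [items_fromkeys] at hp
    simp only [List.mem_map] at hp
    obtain ⟨q, hq, rfl⟩ := hp
    rw [PySem.List.mem_pyRange_one] at hq
    rw [PySem.Dict.contains_eq_decide_mem_keys]
    have hk : (pvDictOr (pvFromkeysRange 1 (x1+1) 3) (pvFromkeysRange (x1+1) (x1+x2+1) 4)).keys
        = PySem.List.pyRange 1 (x1+1) 1 ++ PySem.List.pyRange (x1+1) (x1+x2+1) 1 := by
      simp only [PySem.Dict.keys, h12, List.map_append, List.map_map]
      rw [show ((fun p : Int × Int => p.1) ∘ fun k => (k, (3:Int))) = id from rfl,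
          show ((fun p : Int × Int => p.1) ∘ fun k => (k, (4:Int))) = id from rfl]
      simp
    rw [hk]
    simp [PySem.List.mem_pyRange_one]; omega
  · rw [items_fromkeys]
    exact nodup_fst_pairs 5 (x1+x2+1) (x1+x2+x3+1)

theorem enum_rep_map (n : Nat) (v : Int) : ∀ (s : Int),
    (PySem.List.enumerate (List.replicate n v) s).map (fun p => (p.1 + 1, p.2))
      = (PySem.List.pyRange (s+1) (s+n+1) 1).map (fun k => (k, v)) := by
  induction n with
  | zero =>
    intro s
    rw [show ((0:Nat):Int) = 0 from rfl]
    rw [PySem.List.pyRange_one_eq_nil (by omega)]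
    simp [PySem.List.enumerate_nil]
  | succ m ih =>
    intro s
    have hcons : List.replicate (m+1) v = v :: List.replicate m v := rfl
    rw [hcons, PySem.List.enumerate_cons, List.map_cons,
        PySem.List.pyRange_one_cons (by push_cast; omega), List.map_cons, ih (s+1)]
    have hb : s + ((m:Int)+1) + 1 = (s+1) + m + 1 := by ring
    push_cast
    rw [hb]

theorem itemsB (a b c : Nat) :
    (pvDictComp (List.replicate a (3:Int) ++ List.replicate b 4 ++ List.replicate c 5)).items
      = cfgItems a b c := by
  unfold pvDictComp
  have hfst := PySem.List.map_fst_enumerate (List.replicate a (3:Int) ++ List.replicate b 4 ++ List.replicate c 5) 0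
  rw [PySem.Dict.items_foldl_insert_fresh _ (fun p => p.1 + 1) Prod.snd _
        (by intro p _; rfl)
        (by
          have hm : (PySem.List.enumerate (List.replicate a (3:Int) ++ List.replicate b 4 ++ List.replicate c 5) 0).map (fun p => p.1 + 1)
              = ((PySem.List.enumerate (List.replicate a (3:Int) ++ List.replicate b 4 ++ List.replicate c 5) 0).map (fun p => p.1)).map (fun z => z + 1) := by
            rw [List.map_map]; rfl
          rw [hm, hfst]
          exact (PySem.List.nodup_pyRange_one _ _).map (fun x y => by omega))]
  rw [show (fun p : Int × Int => ((fun q : Int × Int => q.1 + 1) p, Prod.snd p)) = (fun p : Int × Int => (p.1 + 1, p.2)) from rfl]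
  rw [PySem.List.enumerate_append, PySem.List.enumerate_append]
  simp only [List.map_append, List.length_replicate, List.length_append]
  rw [enum_rep_map, enum_rep_map, enum_rep_map, cfgItems]
  have e0 : PySem.Dict.empty.items = ([] : List (Int × Int)) := rfl
  rw [e0, List.nil_append]
  push_cast
  ring_nf

theorem flatMap_congr' {α β : Type} {l : List α} {f g : α → List β}
    (h : ∀ a ∈ l, f a = g a) : l.flatMap f = l.flatMap g := by
  induction l with
  | nil => rfl
  | cons x xs ih =>
    simp only [List.flatMap_cons]
    rw [h x (by simp), ih (fun a ha => h a (by simp [ha]))]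

theorem filter_map_eq_flatMap {α β : Type} (l : List α) (p : α → Bool) (f : α → β) :
    (l.filter p).map f = l.flatMap (fun x => if p x then [f x] else []) := by
  induction l with
  | nil => rfl
  | cons x xs ih =>
    by_cases h : p x <;> simp [h, ih]

theorem filter_eq_singleton {α : Type} {l : List α} {p : α → Bool} {c : α}
    (hnd : l.Nodup) (hc : c ∈ l) (hpc : p c = true) (hu : ∀ x ∈ l, p x = true → x = c) :
    l.filter p = [c] := by
  induction l with
  | nil => simp at hc
  | cons x xs ih =>
    rcases List.mem_cons.mp hc with rfl | hmem
    · rw [List.filter_cons_of_pos hpc]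
      have : xs.filter p = [] := by
        rw [List.filter_eq_nil_iff]
        intro a ha hpa
        have := hu a (by simp [ha]) hpa
        subst this
        exact (List.nodup_cons.mp hnd).1 ha
      rw [this]
    · have hx : p x = false := by
        by_contra h
        have hpx : p x = true := by revert h; cases p x <;> simp
        have := hu x (by simp) hpx
        subst this
        exact (List.nodup_cons.mp hnd).1 hmem
      rw [List.filter_cons_of_neg (by simp [hx])]
      exact ih (List.nodup_cons.mp hnd).2 hmem (fun a ha hpa => hu a (by simp [ha]) hpa)

theorem gen_eq (n : Int) : gen_mmd_configs n = gen_mmd_configs_alt n := by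
  have hA : gen_mmd_configs n
      = (PySem.List.pyRange 0 (PySem.Int.floordiv n 3 + 1) 1).flatMap (fun x1 =>
          (PySem.List.pyRange 0 (PySem.Int.floordiv n 4 + 1) 1).flatMap (fun x2 =>
            ((PySem.List.pyRange 0 (PySem.Int.floordiv n 5 + 1) 1).filter
                (fun x3 => decide (x1 * 3 + x2 * 4 + x3 * 5 = n))).map (fun x3 =>
              (pvDictOr (pvDictOr (pvFromkeysRange 1 (x1 + 1) 3)
                                  (pvFromkeysRange (x1 + 1) (x1 + x2 + 1) 4))
                        (pvFromkeysRange (x1 + x2 + 1) (x1 + x2 + x3 + 1) 5)).items))) := by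
    unfold gen_mmd_configs
    simp only [PySem.List.foldl_append_ite, PySem.List.foldl_append_eq_flatMap]
    simp
  have hB : gen_mmd_configs_alt n
      = (PySem.List.pyRange 0 (PySem.Int.floordiv n 3 + 1) 1).flatMap (fun x1 =>
          (PySem.List.pyRange 0 (PySem.Int.floordiv (n - 3 * x1) 4 + 1) 1).flatMap (fun x2 =>
            if PySem.Int.mod (n - 3 * x1 - 4 * x2) 5 = 0 then
              [(pvDictComp (List.replicate x1.toNat 3 ++ List.replicate x2.toNat 4 ++
                  List.replicate (PySem.Int.floordiv (n - 3 * x1 - 4 * x2) 5).toNat 5)).items]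
            else [])) := by
    unfold gen_mmd_configs_alt
    simp only [PySem.List.foldl_append_ite, PySem.List.foldl_append_eq_flatMap]
    simp only [List.nil_append]
    apply flatMap_congr'
    intro x1 _
    rw [filter_map_eq_flatMap]
    apply flatMap_congr'
    intro x2 _
    simp only [decide_eq_true_eq]
  rw [hA, hB]
  apply flatMap_congr'
  intro x1 hx1
  rw [PySem.List.mem_pyRange_one] at hx1
  have hx1n : x1 * 3 ≤ n := by
    have := (PySem.Int.le_floordiv_iff_mul_le (a := n) (b := 3) (q := x1) (by omega)).mp (by omega)
    omega
  have hr1 : 0 ≤ n - 3 * x1 := by omega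
  -- split A's x2 range
  have hm0 : (0:Int) ≤ PySem.Int.floordiv (n - 3 * x1) 4 := by
    exact (PySem.Int.le_floordiv_iff_mul_le (by omega)).mpr (by omega)
  have hmle : PySem.Int.floordiv (n - 3 * x1) 4 ≤ PySem.Int.floordiv n 4 := by
    apply (PySem.Int.le_floordiv_iff_mul_le (by omega)).mpr
    have h1 : PySem.Int.floordiv (n - 3 * x1) 4 * 4 ≤ n - 3 * x1 :=
      (PySem.Int.le_floordiv_iff_mul_le (by omega)).mp le_rfl
    omega
  rw [PySem.List.pyRange_one_append 0 (PySem.Int.floordiv (n - 3 * x1) 4 + 1)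
        (PySem.Int.floordiv n 4 + 1) (by omega) (by omega),
      List.flatMap_append]
  have htail : (PySem.List.pyRange (PySem.Int.floordiv (n - 3 * x1) 4 + 1)
      (PySem.Int.floordiv n 4 + 1) 1).flatMap (fun x2 =>
        ((PySem.List.pyRange 0 (PySem.Int.floordiv n 5 + 1) 1).filter
            (fun x3 => decide (x1 * 3 + x2 * 4 + x3 * 5 = n))).map (fun x3 =>
          (pvDictOr (pvDictOr (pvFromkeysRange 1 (x1 + 1) 3)
                              (pvFromkeysRange (x1 + 1) (x1 + x2 + 1) 4))
                    (pvFromkeysRange (x1 + x2 + 1) (x1 + x2 + x3 + 1) 5)).items)) = [] := by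
    rw [List.flatMap_eq_nil_iff]
    intro x2 hx2
    rw [PySem.List.mem_pyRange_one] at hx2
    have hgt : n - 3 * x1 < x2 * 4 := by
      have h1 : PySem.Int.floordiv (n - 3 * x1) 4 * 4 + PySem.Int.mod (n - 3 * x1) 4 = n - 3 * x1 :=
        PySem.Int.floordiv_mul_add_mod _ _
      have h2 : 0 ≤ PySem.Int.mod (n - 3 * x1) 4 ∧ PySem.Int.mod (n - 3 * x1) 4 < 4 := by
        constructor
        · exact PySem.Int.mod_nonneg _ (by omega)
        · exact PySem.Int.mod_lt _ (by omega)
      omega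
    have hfil : (PySem.List.pyRange 0 (PySem.Int.floordiv n 5 + 1) 1).filter
        (fun x3 => decide (x1 * 3 + x2 * 4 + x3 * 5 = n)) = [] := by
      rw [List.filter_eq_nil_iff]
      intro x3 hx3
      rw [PySem.List.mem_pyRange_one] at hx3
      simp only [decide_eq_true_eq]
      omega
    rw [hfil, List.map_nil]
  rw [htail, List.append_nil]
  apply flatMap_congr'
  intro x2 hx2
  rw [PySem.List.mem_pyRange_one] at hx2
  have hx2r : x2 * 4 ≤ n - 3 * x1 := by
    have := (PySem.Int.le_floordiv_iff_mul_le (a := n - 3 * x1) (b := 4) (q := x2) (by omega)).mp (by omega)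
    omega
  have hr2 : 0 ≤ n - 3 * x1 - 4 * x2 := by omega
  have hdm : PySem.Int.floordiv (n - 3 * x1 - 4 * x2) 5 * 5 + PySem.Int.mod (n - 3 * x1 - 4 * x2) 5
      = n - 3 * x1 - 4 * x2 := PySem.Int.floordiv_mul_add_mod _ _
  have hm5a : 0 ≤ PySem.Int.mod (n - 3 * x1 - 4 * x2) 5 := PySem.Int.mod_nonneg _ (by omega)
  have hm5b : PySem.Int.mod (n - 3 * x1 - 4 * x2) 5 < 5 := PySem.Int.mod_lt _ (by omega)
  by_cases hmod : PySem.Int.mod (n - 3 * x1 - 4 * x2) 5 = 0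
  · rw [if_pos hmod]
    have ht5 : PySem.Int.floordiv (n - 3 * x1 - 4 * x2) 5 * 5 = n - 3 * x1 - 4 * x2 := by omega
    set t := PySem.Int.floordiv (n - 3 * x1 - 4 * x2) 5 with htdef
    have ht0 : 0 ≤ t := by nlinarith
    have htn : t ≤ PySem.Int.floordiv n 5 :=
      (PySem.Int.le_floordiv_iff_mul_le (by omega)).mpr (by omega)
    have hfil : (PySem.List.pyRange 0 (PySem.Int.floordiv n 5 + 1) 1).filter
        (fun x3 => decide (x1 * 3 + x2 * 4 + x3 * 5 = n)) = [t] := by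
      apply filter_eq_singleton (PySem.List.nodup_pyRange_one _ _)
      · rw [PySem.List.mem_pyRange_one]; omega
      · simp only [decide_eq_true_eq]; omega
      · intro x hx hp
        rw [PySem.List.mem_pyRange_one] at hx
        simp only [decide_eq_true_eq] at hp
        omega
    rw [hfil, List.map_singleton]
    congr 1
    rw [itemsA x1 x2 t (by omega)]
    rw [itemsB x1.toNat x2.toNat t.toNat]
    rw [Int.toNat_of_nonneg (by omega), Int.toNat_of_nonneg (by omega), Int.toNat_of_nonneg ht0]
  · rw [if_neg hmod]
    have hfil : (PySem.List.pyRange 0 (PySem.Int.floordiv n 5 + 1) 1).filter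
        (fun x3 => decide (x1 * 3 + x2 * 4 + x3 * 5 = n)) = [] := by
      rw [List.filter_eq_nil_iff]
      intro x3 hx3
      simp only [decide_eq_true_eq]
      intro he
      apply hmod
      omega
    rw [hfil, List.map_nil]

-- ===== VERDICT (by name: the statement is the Claim_ definition above) =====
theorem gen_mmd_configs_spec : Claim_equal_gen_mmd_configs := by
  intro n _
  exact gen_eq n
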